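-- pv_equiv track=rewrite | github.com/arianahejazyan/chess-engine | Nyx/utils/mask_methods.py | mask_ascending_attacks
-- ===== SOURCE A (Python) =====
-- def mask_ascending_attacks(square: int) -> int:
--     """
--     Generates a bitboard representing the possible ascending diagonal attacks from a given square on a chess board.
--     Ascending diagonals move from bottom-left to top-right or vice versa.
--
--     Parameters:
--         square (int): The position of the piece (0-based index) on the chessboard for which to generate attack masks.
--
--     Returns:
--         int: A bitboard representing the possible attack squares along the ascending diagonal from the input square.
--
--     Note:
--         - The function assumes that the square parameter is a non-negative integer less than the number of squares on a chessboard (196 squares).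
--         - The returned bitboard represents the attack squares along the ascending diagonal, considering only the ascending diagonal movement rules.
--     """
--
--     # Initialize bitboard mask
--     mask = 0
--
--     # Calculate rank and file of the given square
--     r = square // 14
--     f = square % 14
--
--     # Generate attack masks for the ascending diagonal in Up-Right direction
--     for d in range(1, min(13 - r,13 - f)):
--         mask ^= (1 << square + d * 15)
--
--     # Generate attack masks for the ascending diagonal in Down-Left direction
--     for d in range(1, min(r,f)):
--         mask ^= (1 << square - d * 15)
--
--     return mask
-- ===== SOURCE B (Python) =====
-- def mask_ascending_attacks(square: int) -> int:
--     """Closed-form bitboard of ascending-diagonal attacks: each direction is a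
--     run of bits spaced 15 apart, produced in one shot as a geometric bit
--     pattern (2**(15*k)-1)//(2**15-1) shifted to the run's lowest square —
--     no per-square loop at all."""
--     r, f = divmod(square, 14)
--     u = min(13 - r, 13 - f) - 1   # number of up-right attack squares
--     v = min(r, f) - 1             # number of down-left attack squares
--     mask = 0
--     if u > 0:
--         mask |= ((1 << 15 * u) - 1) // 0x7FFF << (square + 15)
--     if v > 0:
--         mask |= ((1 << 15 * v) - 1) // 0x7FFF << (square - 15 * v)
--     return mask
-- ===== Notes on version B (the rewrite author's own statement) =====
-- stated objective: alternative
-- what changed: Replaces A's two per-square loops (one XOR per diagonal square) by a loop-free closed form: each diagonal run is the geometric bit pattern ((1<<15k)-1)//0x7FFF, ones every 15 bits, shifted to the run's lowest square and OR-ed in.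
import Mathlib
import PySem

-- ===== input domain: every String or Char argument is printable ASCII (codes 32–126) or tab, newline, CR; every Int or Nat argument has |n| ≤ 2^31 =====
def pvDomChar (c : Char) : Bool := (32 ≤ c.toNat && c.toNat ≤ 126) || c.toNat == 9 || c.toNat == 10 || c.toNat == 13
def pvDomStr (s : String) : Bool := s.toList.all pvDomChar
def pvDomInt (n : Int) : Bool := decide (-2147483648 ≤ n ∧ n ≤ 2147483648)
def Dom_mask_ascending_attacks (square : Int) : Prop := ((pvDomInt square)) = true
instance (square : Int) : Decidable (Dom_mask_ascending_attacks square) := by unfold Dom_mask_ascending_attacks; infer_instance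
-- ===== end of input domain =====

-- B replaces A's per-square attack loops by a closed-form bit pattern: each diagonal run is
-- ((1<<15k)-1)//0x7FFF (ones every 15 bits) shifted to the run's lowest square; no loop at all.

-- ===== PORT A =====
def mask_ascending_attacks (square : Int) : Int :=
  let mask : Int := 0
  let r := PySem.Int.floordiv square 14
  let f := PySem.Int.mod square 14
  let mask := (PySem.List.pyRange 1 (min (13 - r) (13 - f)) 1).foldl
      (fun m d => PySem.Int.bxor m ((1 : Int) <<< (square + d * 15).toNat)) mask
  let mask := (PySem.List.pyRange 1 (min r f) 1).foldl
      (fun m d => PySem.Int.bxor m ((1 : Int) <<< (square - d * 15).toNat)) mask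
  mask

-- ===== PORT B =====
def mask_ascending_attacks_alt (square : Int) : Int :=
  let r := PySem.Int.floordiv square 14
  let f := PySem.Int.mod square 14
  let u := min (13 - r) (13 - f) - 1
  let v := min r f - 1
  let mask : Int := 0
  let mask := if 0 < u then
      PySem.Int.bor mask
        ((PySem.Int.floordiv ((1 : Int) <<< (15 * u).toNat - 1) 32767) <<< (square + 15).toNat)
    else mask
  let mask := if 0 < v then
      PySem.Int.bor mask
        ((PySem.Int.floordiv ((1 : Int) <<< (15 * v).toNat - 1) 32767) <<< (square - 15 * v).toNat)
    else mask
  mask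

-- ===== PRECONDITION & SPEC =====
-- Pre_ excludes exactly the inputs where Python A raises (ValueError: the first up-right
-- iteration's shift amount is negative); A returns normally on every other input.
def Pre_mask_ascending_attacks (square : Int) : Prop :=
  -15 ≤ square ∨ 12 ≤ PySem.Int.mod square 14
instance (square : Int) : Decidable (Pre_mask_ascending_attacks square) := by
  unfold Pre_mask_ascending_attacks; infer_instance
def pvWitness_mask_ascending_attacks : Int := 97

def Spec_mask_ascending_attacks (square : Int) (out : Int) : Prop := out = mask_ascending_attacks_alt square
instance (square : Int) (out : Int) : Decidable (Spec_mask_ascending_attacks square out) := by unfold Spec_mask_ascending_attacks; infer_instance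

-- ===== CLAIM (what is proved, stated in full; the proofs are below) =====
def Claim_equal_mask_ascending_attacks : Prop := ∀ (square : Int), Dom_mask_ascending_attacks square → Pre_mask_ascending_attacks square → Spec_mask_ascending_attacks square (mask_ascending_attacks square)

-- ===== LEMMAS AND PROOFS =====

-- B's "ones every 15 bits" pattern, as a Nat: pvS k = Σ_{i<k} 2^(15 i).
def pvS : Nat → Nat
  | 0 => 0
  | k + 1 => pvS k + 2 ^ (15 * k)

theorem pvS_mul (k : Nat) : 32767 * pvS k + 1 = 2 ^ (15 * k) := by
  induction k with
  | zero => simp [pvS]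
  | succ k ih =>
    have h : 2 ^ (15 * (k + 1)) = 2 ^ (15 * k) * 32768 := by
      rw [Nat.mul_succ, pow_add]; norm_num
    rw [h, pvS]
    omega

theorem pvS_div (k : Nat) : (2 ^ (15 * k) - 1) / 32767 = pvS k := by
  have h := pvS_mul k
  omega

theorem pvS_lt (k : Nat) : pvS k < 2 ^ (15 * k) := by
  have h := pvS_mul k
  omega

-- disjoint OR is addition: if b fits below bit i then 2^i*a + b = 2^i*a ||| b
theorem pv_mul_pow_add_eq_or (i a b : Nat) (hb : b < 2 ^ i) :
    2 ^ i * a + b = 2 ^ i * a ||| b := by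
  apply Nat.eq_of_testBit_eq
  intro j
  have h0 : (2 ^ i * a + 0).testBit j = if j < i then (0 : Nat).testBit j else a.testBit (j - i) :=
    Nat.testBit_two_pow_mul_add a (Nat.two_pow_pos i) j
  rw [Nat.testBit_two_pow_mul_add a hb j, Nat.testBit_lor]
  rw [Nat.add_zero] at h0
  rw [h0]
  by_cases hj : j < i
  · simp [hj]
  · have hbj : b.testBit j = false :=
      Nat.testBit_eq_false_of_lt (lt_of_lt_of_le hb (Nat.pow_le_pow_right (by norm_num) (by omega)))
    simp [hj, hbj]

theorem pv_xor_or_step (acc e : Nat) (h : acc.testBit e = false) :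
    acc ^^^ 2 ^ e = acc ||| 2 ^ e := by
  apply Nat.eq_of_testBit_eq
  intro i
  by_cases hi : e = i
  · subst hi
    simp [Nat.testBit_xor, Nat.testBit_or, h]
  · simp [Nat.testBit_xor, Nat.testBit_or, Nat.testBit_two_pow_of_ne hi]

-- XOR-ing a power above the accumulator is addition
theorem pv_xor_pow_of_lt (a e : Nat) (h : a < 2 ^ e) : a ^^^ 2 ^ e = a + 2 ^ e := by
  rw [pv_xor_or_step a e (Nat.testBit_eq_false_of_lt h), Nat.lor_comm]
  have h2 := pv_mul_pow_add_eq_or e 1 a h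
  rw [mul_one] at h2
  omega

-- XOR-ing a power below an accumulator divisible by the next power is addition
theorem pv_xor_pow_of_dvd (a e : Nat) (h : 2 ^ (e + 1) ∣ a) : a ^^^ 2 ^ e = a + 2 ^ e := by
  obtain ⟨c, rfl⟩ := h
  have hb : (2 : Nat) ^ e < 2 ^ (e + 1) := Nat.pow_lt_pow_right (by norm_num) (by omega)
  have ht : (2 ^ (e + 1) * c).testBit e = false := by
    have h0 := Nat.testBit_two_pow_mul_add c (Nat.two_pow_pos (e+1)) e
    rw [Nat.add_zero] at h0
    simp [h0]
  rw [pv_xor_or_step _ e ht, ← pv_mul_pow_add_eq_or (e + 1) c _ hb]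

-- A's up-right loop at Nat level: XOR over ascending exponents s0, s0+15, …
theorem pv_fold_up (u : Nat) : ∀ (s0 acc : Nat), acc < 2 ^ s0 →
    (List.range u).foldl (fun m k => m ^^^ 2 ^ (s0 + 15 * k)) acc = acc + 2 ^ s0 * pvS u := by
  induction u with
  | zero => intro s0 acc _; simp [pvS]
  | succ u ih =>
    intro s0 acc hacc
    rw [List.range_succ, List.foldl_append, List.foldl_cons, List.foldl_nil, ih s0 acc hacc]
    have hlt : acc + 2 ^ s0 * pvS u < 2 ^ (s0 + 15 * u) := by
      have h1 := pvS_lt u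
      have h2 : 2 ^ s0 * pvS u + 2 ^ s0 ≤ 2 ^ s0 * 2 ^ (15 * u) := by
        have := Nat.mul_le_mul_left (2 ^ s0) (Nat.succ_le_of_lt h1)
        omega
      rw [pow_add]
      omega
    rw [pv_xor_pow_of_lt _ _ hlt, pvS]
    ring

-- A's down-left loop at Nat level: XOR over descending exponents t0+15(v-1), …, t0
theorem pv_fold_down (v : Nat) : ∀ (t0 acc : Nat), 2 ^ (t0 + 15 * v) ∣ acc →
    (List.range v).foldl (fun m k => m ^^^ 2 ^ (t0 + 15 * (v - 1 - k))) acc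
      = acc + 2 ^ t0 * pvS v := by
  induction v with
  | zero => intro t0 acc _; simp [pvS]
  | succ v ih =>
    intro t0 acc hacc
    rw [List.range_succ_eq_map, List.foldl_cons, List.foldl_map]
    have he : v + 1 - 1 - 0 = v := by omega
    rw [he]
    have hd : 2 ^ (t0 + 15 * v + 1) ∣ acc := by
      refine dvd_trans (pow_dvd_pow 2 (by omega)) hacc
    rw [pv_xor_pow_of_dvd acc (t0 + 15 * v) hd]
    have hstep : ∀ k : Nat, t0 + 15 * (v + 1 - 1 - (k + 1)) = t0 + 15 * (v - 1 - k) := by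
      intro k; omega
    have hfun :
        (List.range v).foldl (fun m k => m ^^^ 2 ^ (t0 + 15 * (v + 1 - 1 - (k + 1))))
            (acc + 2 ^ (t0 + 15 * v))
          = (List.range v).foldl (fun m k => m ^^^ 2 ^ (t0 + 15 * (v - 1 - k)))
            (acc + 2 ^ (t0 + 15 * v)) := by
      refine PySem.List.foldl_congr_mem _ _ _ _ ?_
      intro m k _
      rw [hstep k]
    rw [hfun, ih t0 _ (by exact Dvd.dvd.add (dvd_trans (pow_dvd_pow 2 (by omega)) hacc) dvd_rfl), pvS]
    ring

theorem pv_shl_cast (k : Nat) : (1 : Int) <<< k = ((2 ^ k : Nat) : Int) := by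
  norm_num [Int.shiftLeft_eq]

-- casting the Int XOR-loop body down to Nat
theorem pv_int_fold_xor (L : List Nat) (g : Nat → Nat) : ∀ (n : Nat),
    L.foldl (fun (m : Int) k => PySem.Int.bxor m ((1 : Int) <<< g k)) (n : Int)
      = ((L.foldl (fun m k => m ^^^ 2 ^ g k) n : Nat) : Int) := by
  induction L with
  | nil => intro n; rfl
  | cons k tl ih =>
    intro n
    rw [List.foldl_cons, List.foldl_cons, pv_shl_cast, PySem.Int.bxor_natCast, ih]

theorem mask_ascending_attacks_spec : Claim_equal_mask_ascending_attacks := by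
  unfold Claim_equal_mask_ascending_attacks Spec_mask_ascending_attacks Pre_mask_ascending_attacks
  intro square _ hpre
  unfold mask_ascending_attacks mask_ascending_attacks_alt
  set r := PySem.Int.floordiv square 14 with hr
  set f := PySem.Int.mod square 14 with hfdef
  have hf0 : 0 ≤ f := PySem.Int.mod_nonneg square (by norm_num)
  have hf14 : f < 14 := PySem.Int.mod_lt square (by norm_num)
  have hs : r * 14 + f = square := PySem.Int.floordiv_mul_add_mod square 14
  simp only []
  set U : Int := min (13 - r) (13 - f) with hU
  set V : Int := min r f with hV
  set u : Nat := (U - 1).toNat with hu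
  set v : Nat := (V - 1).toNat with hv
  set s0 : Nat := (square + 15).toNat with hs0
  set t0 : Nat := (square - 15 * (V - 1)).toNat with ht0
  -- the up-right fold
  have hupA :
      (PySem.List.pyRange 1 U 1).foldl
          (fun m d => PySem.Int.bxor m ((1 : Int) <<< (square + d * 15).toNat)) (0 : Int)
        = ((2 ^ s0 * pvS u : Nat) : Int) := by
    by_cases hU1 : U ≤ 1
    · rw [PySem.List.pyRange_one_eq_nil hU1]
      have : u = 0 := by omega
      rw [this]
      simp [pvS]
    · have hsq : -15 ≤ square := by
        rcases hpre with h | h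
        · exact h
        · exfalso; omega
      rw [PySem.List.pyRange_one, List.foldl_map]
      rw [show (0 : Int) = ((0 : Nat) : Int) from rfl]
      rw [pv_int_fold_xor _ (fun k => (square + (1 + (k : Int)) * 15).toNat) 0]
      have hcong :
          (List.range ((U - 1).toNat)).foldl
              (fun (m : Nat) (k : Nat) => m ^^^ 2 ^ (square + (1 + (k : Int)) * 15).toNat) 0
            = (List.range u).foldl (fun m k => m ^^^ 2 ^ (s0 + 15 * k)) 0 := by
        refine PySem.List.foldl_congr_mem _ _ _ _ ?_
        intro m k _
        have : (square + (1 + (k : Int)) * 15).toNat = s0 + 15 * k := by omega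
        rw [this]
      rw [hcong, pv_fold_up u s0 0 (Nat.two_pow_pos s0)]
      norm_num
  -- the down-left fold on top of the up-right result
  have ht0v : 0 < V - 1 → (square - 15 * (V - 1) ≥ 15 ∧ t0 + 15 * v = square.toNat ∧ s0 = square.toNat + 15) := by
    intro hV1
    omega
  have hdownA :
      (PySem.List.pyRange 1 V 1).foldl
          (fun m d => PySem.Int.bxor m ((1 : Int) <<< (square - d * 15).toNat))
          ((2 ^ s0 * pvS u : Nat) : Int)
        = ((2 ^ s0 * pvS u + 2 ^ t0 * pvS v : Nat) : Int) := by
    by_cases hV1 : V ≤ 1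
    · rw [PySem.List.pyRange_one_eq_nil hV1]
      have : v = 0 := by omega
      rw [this]
      simp [pvS]
    · obtain ⟨hq15, hteq, hseq⟩ := ht0v (by omega)
      rw [PySem.List.pyRange_one, List.foldl_map]
      rw [pv_int_fold_xor _ (fun k => (square - (1 + (k : Int)) * 15).toNat) _]
      have hcong :
          (List.range ((V - 1).toNat)).foldl
              (fun (m : Nat) (k : Nat) => m ^^^ 2 ^ (square - (1 + (k : Int)) * 15).toNat) (2 ^ s0 * pvS u)
            = (List.range v).foldl (fun m k => m ^^^ 2 ^ (t0 + 15 * (v - 1 - k)))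
                (2 ^ s0 * pvS u) := by
        refine PySem.List.foldl_congr_mem _ _ _ _ ?_
        intro m k hk
        have hk' : k < v := by
          have := List.mem_range.mp hk
          omega
        have : (square - (1 + (k : Int)) * 15).toNat = t0 + 15 * (v - 1 - k) := by omega
        rw [this]
      rw [hcong]
      have hdvd : 2 ^ (t0 + 15 * v) ∣ 2 ^ s0 * pvS u := by
        exact Dvd.dvd.mul_right (pow_dvd_pow 2 (by omega)) (pvS u)
      rw [pv_fold_down v t0 _ hdvd]
  rw [hupA, hdownA]
  -- now evaluate B
  have hBup :
      (if 0 < U - 1 then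
          PySem.Int.bor 0
            ((PySem.Int.floordiv ((1 : Int) <<< (15 * (U - 1)).toNat - 1) 32767) <<< (square + 15).toNat)
        else (0 : Int))
        = ((2 ^ s0 * pvS u : Nat) : Int) := by
    by_cases hU1 : 0 < U - 1
    · rw [if_pos hU1]
      have h15 : (15 * (U - 1)).toNat = 15 * u := by omega
      rw [h15, pv_shl_cast]
      have hsub : ((2 ^ (15 * u) : Nat) : Int) - 1 = ((2 ^ (15 * u) - 1 : Nat) : Int) := by
        have : 1 ≤ 2 ^ (15 * u) := Nat.one_le_two_pow
        omega
      rw [hsub]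
      have hdiv : PySem.Int.floordiv ((2 ^ (15 * u) - 1 : Nat) : Int) 32767
          = (((2 ^ (15 * u) - 1) / 32767 : Nat) : Int) := by
        have := PySem.Int.floordiv_natCast (2 ^ (15 * u) - 1) 32767
        exact_mod_cast this
      rw [hdiv, pvS_div, Int.shiftLeft_eq, PySem.Int.bor_comm, PySem.Int.bor_zero]
      push_cast
      ring
    · rw [if_neg hU1]
      have : u = 0 := by omega
      rw [this]
      simp [pvS]
  rw [hBup]
  by_cases hV1 : 0 < V - 1
  · rw [if_pos hV1]
    obtain ⟨hq15, hteq, hseq⟩ := ht0v hV1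
    have h15 : (15 * (V - 1)).toNat = 15 * v := by omega
    rw [h15, pv_shl_cast]
    have hsub : ((2 ^ (15 * v) : Nat) : Int) - 1 = ((2 ^ (15 * v) - 1 : Nat) : Int) := by
      have : 1 ≤ 2 ^ (15 * v) := Nat.one_le_two_pow
      omega
    rw [hsub]
    have hdiv : PySem.Int.floordiv ((2 ^ (15 * v) - 1 : Nat) : Int) 32767
        = (((2 ^ (15 * v) - 1) / 32767 : Nat) : Int) := by
      have := PySem.Int.floordiv_natCast (2 ^ (15 * v) - 1) 32767
      exact_mod_cast this
    rw [hdiv, pvS_div, Int.shiftLeft_eq]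
    have hcast : ((pvS v : Nat) : Int) * 2 ^ t0 = ((2 ^ t0 * pvS v : Nat) : Int) := by
      push_cast; ring
    rw [hcast, PySem.Int.bor_natCast]
    have hb : 2 ^ t0 * pvS v < 2 ^ s0 := by
      have h1 := pvS_lt v
      have h2 : 2 ^ t0 * pvS v < 2 ^ t0 * 2 ^ (15 * v) :=
        (Nat.mul_lt_mul_left (Nat.two_pow_pos t0)).mpr h1
      rw [← pow_add] at h2
      exact lt_of_lt_of_le h2 (Nat.pow_le_pow_right (by norm_num) (by omega))
    rw [← pv_mul_pow_add_eq_or s0 (pvS u) _ hb]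
  · rw [if_neg hV1]
    have : v = 0 := by omega
    rw [this]
    simp [pvS]
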